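-- pv_equiv track=rewrite | github.com/ZorgiDannyDepecker/CSAT-Compass | src/csat/config/pillars.py | get_pillar_for_product
-- ===== SOURCE A (Python) =====
-- PILLAR_REGISTRY: dict[str, dict] = {
--     "zorgi": {
--         "name": "ZORGI",
--         "name_fr": "ZORGI",
--         "direction": "centrum",
--         "color": "#003366",
--         "products": [],  # aggregatie — geen directe productfilter
--     },
--     "pharma": {
--         "name": "PHARMA",
--         "name_fr": "PHARMA",
--         "direction": "noord",
--         "color": "#0066CC",
--         "products": ["Apotheek", "AZIS Pharmacy"],  # bevestigd 20/03/2026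
--     },
--     "care": {
--         "name": "CARE",
--         "name_fr": "CARE",
--         "direction": "oost",
--         "color": "#00AA44",
--         "products": ["ZORGI CARE"],  # bevestigd 20/03/2026
--     },
--     "care_admin": {
--         "name": "CARE ADMIN",
--         "name_fr": "CARE ADMIN",
--         "direction": "west",
--         "color": "#FF6600",
--         "products": ["Oazis", "ZORGI Care Admin"],  # bevestigd 20/03/2026
--     },
--     "erp4hc": {
--         "name": "ERP4HC",
--         "name_fr": "ERP4HC",
--         "direction": "zuid",
--         "color": "#9900CC",
--         "products": ["ERP4HC2.0", "ERP4HC"],  # bevestigd 20/03/2026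
--         # ⚠️ Te bevestigen: ECO/BOEK (327), HRM (193), PADM/TARFAC (108) ook ERP?
--     },
-- }
--
-- def get_pillar_for_product(product: str) -> str:
--     """
--     Geef de pijlersleutel terug op basis van de product-waarde uit de view.
--
--     Args:
--         product: Waarde uit de product-kolom van V_CSAT_1
--
--     Returns:
--         Pijlersleutel (pharma, care, care_admin, erp4hc) of 'unknown'
--     """
--     if not product:
--         return "unknown"
--     product_upper = product.strip().upper()
--     for pillar_key, pillar_config in PILLAR_REGISTRY.items():
--         if pillar_key == "zorgi":
--             continue
--         for p in pillar_config["products"]: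
--             if p.upper() == product_upper:
--                 return pillar_key
--     return "unknown"
-- ===== SOURCE B (Python) =====
-- # Precomputed reverse index: uppercased product name -> pillar key; one hash lookup instead of nested scans.
-- _PRODUCT_TO_PILLAR = {
--     "APOTHEEK": "pharma",
--     "AZIS PHARMACY": "pharma",
--     "ZORGI CARE": "care",
--     "OAZIS": "care_admin",
--     "ZORGI CARE ADMIN": "care_admin",
--     "ERP4HC2.0": "erp4hc",
--     "ERP4HC": "erp4hc",
-- }
--
-- def get_pillar_for_product(product: str) -> str:
--     if not product:
--         return "unknown"
--     return _PRODUCT_TO_PILLAR.get(product.strip().upper(), "unknown")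
-- ===== Notes on version B (the rewrite author's own statement) =====
-- stated objective: idiomatic
-- what changed: Replaces the nested scan over PILLAR_REGISTRY (skipping 'zorgi', uppercasing each product on every call) with a module-level precomputed reverse dict from uppercased product name to pillar key and a single dict.get lookup.
import Mathlib
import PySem

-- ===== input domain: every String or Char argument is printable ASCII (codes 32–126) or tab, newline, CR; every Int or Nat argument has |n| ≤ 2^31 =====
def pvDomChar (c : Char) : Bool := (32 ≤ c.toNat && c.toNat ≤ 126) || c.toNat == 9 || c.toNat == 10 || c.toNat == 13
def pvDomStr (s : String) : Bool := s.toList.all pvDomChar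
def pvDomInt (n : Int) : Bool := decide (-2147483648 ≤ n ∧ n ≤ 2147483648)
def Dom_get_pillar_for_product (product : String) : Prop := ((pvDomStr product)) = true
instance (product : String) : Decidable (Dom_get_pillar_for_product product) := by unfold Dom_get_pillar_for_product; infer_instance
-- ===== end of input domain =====

-- B replaces A's nested registry scan with a precomputed reverse-lookup dict (idiomatic; return value only).

-- ===== PORT A =====
-- PILLAR_REGISTRY reduced to the fields A reads: (pillar_key, products)
def pvRegistryA : List (String × List String) :=
  [("zorgi", []),
   ("pharma", ["Apotheek", "AZIS Pharmacy"]),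
   ("care", ["ZORGI CARE"]),
   ("care_admin", ["Oazis", "ZORGI Care Admin"]),
   ("erp4hc", ["ERP4HC2.0", "ERP4HC"])]

-- inner loop: `for p in pillar_config["products"]: if p.upper() == product_upper: return pillar_key`
def pvScanProducts (pu : String) (key : String) : List String → Option String
  | [] => none
  | p :: rest => if PySem.Str.upper p == pu then some key else pvScanProducts pu key rest

-- outer loop over the registry, `continue` on "zorgi"
def pvScanPillars (pu : String) : List (String × List String) → String
  | [] => "unknown"
  | (k, ps) :: rest =>
      if k == "zorgi" then pvScanPillars pu rest
      else
        match pvScanProducts pu k ps with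
        | some r => r
        | none => pvScanPillars pu rest

def get_pillar_for_product (product : String) : String :=
  if product == "" then "unknown"
  else pvScanPillars (PySem.Str.upper (PySem.Str.strip product)) pvRegistryA

-- ===== PORT B =====
-- the precomputed reverse index _PRODUCT_TO_PILLAR
def pvProductToPillar : PySem.Dict String String :=
  PySem.Dict.mk
    [("APOTHEEK", "pharma"),
     ("AZIS PHARMACY", "pharma"),
     ("ZORGI CARE", "care"),
     ("OAZIS", "care_admin"),
     ("ZORGI CARE ADMIN", "care_admin"),
     ("ERP4HC2.0", "erp4hc"),
     ("ERP4HC", "erp4hc")]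

def get_pillar_for_product_alt (product : String) : String :=
  if product == "" then "unknown"
  else PySem.Dict.getD pvProductToPillar (PySem.Str.upper (PySem.Str.strip product)) "unknown"

-- ===== PRECONDITION & SPEC =====
def Spec_get_pillar_for_product (product : String) (out : String) : Prop := out = get_pillar_for_product_alt product
instance (product : String) (out : String) : Decidable (Spec_get_pillar_for_product product out) := by unfold Spec_get_pillar_for_product; infer_instance

-- ===== CLAIM (what is proved, stated in full; the proofs are below) =====
def Claim_equal_get_pillar_for_product : Prop := ∀ (product : String), Dom_get_pillar_for_product product → Spec_get_pillar_for_product product (get_pillar_for_product product)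

-- ===== LEMMAS AND PROOFS =====

-- the scan over the constant registry agrees with the lookup in the constant index, for EVERY key u
lemma scan_eq_lookup (u : String) :
    pvScanPillars u pvRegistryA = PySem.Dict.getD pvProductToPillar u "unknown" := by
  have e1 : PySem.Str.upper "Apotheek" = "APOTHEEK" := by decide
  have e2 : PySem.Str.upper "AZIS Pharmacy" = "AZIS PHARMACY" := by decide
  have e3 : PySem.Str.upper "ZORGI CARE" = "ZORGI CARE" := by decide
  have e4 : PySem.Str.upper "Oazis" = "OAZIS" := by decide
  have e5 : PySem.Str.upper "ZORGI Care Admin" = "ZORGI CARE ADMIN" := by decide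
  have e6 : PySem.Str.upper "ERP4HC2.0" = "ERP4HC2.0" := by decide
  have e7 : PySem.Str.upper "ERP4HC" = "ERP4HC" := by decide
  simp [pvScanPillars, pvScanProducts, pvRegistryA, pvProductToPillar,
        PySem.Dict.getD, PySem.Dict.get?_mk_cons, e1, e2, e3, e4, e5, e6, e7]
  split_ifs <;> rfl

-- ===== VERDICT (by name: the statement is the Claim_ definition above) =====
theorem get_pillar_for_product_spec : Claim_equal_get_pillar_for_product := by
  intro product _
  unfold Spec_get_pillar_for_product get_pillar_for_product get_pillar_for_product_alt
  by_cases he : product == ""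
  · simp [he]
  · simp only [he, if_false, Bool.false_eq_true]
    exact scan_eq_lookup _
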